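-- pv_equiv track=rewrite | github.com/tomoyasu-sasaki/kanshichan_webapp | backend/src/models/analysis_result.py | _generate_advice_text
-- ===== SOURCE A (Python) =====
-- from typing import Dict, Any, List, Optional
--
-- def _generate_advice_text(recommendations: List[Dict]) -> tuple[str, str]:
--     """推奨事項から音声アドバイステキストを生成
--
--     Args:
--         recommendations: 推奨事項リスト
--
--     Returns:
--         tuple: (アドバイステキスト, 優先度)
--     """
--     if not recommendations:
--         return "今日もお疲れ様でした。", "low"
--
--     # 最も優先度の高い推奨事項を選択
--     high_priority = [r for r in recommendations if r.get('priority') == 'high']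
--     medium_priority = [r for r in recommendations if r.get('priority') == 'medium']
--
--     if high_priority:
--         advice = high_priority[0].get('message', '重要な改善点があります。')
--         return advice, 'high'
--     elif medium_priority:
--         advice = medium_priority[0].get('message', '改善の余地があります。')
--         return advice, 'medium'
--     else:
--         advice = recommendations[0].get('message', '継続して頑張りましょう。')
--         return advice, 'low'
-- ===== SOURCE B (Python) =====
-- def _generate_advice_text(recommendations):
--     """Rank-and-select: map each priority to a numeric rank, take the stable
--     minimum by rank, and look the default message / label up in a table."""
--     if not recommendations:
--         return "今日もお疲れ様でした。", "low"
--     RANK = {'high': 0, 'medium': 1}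
--     TABLE = [('重要な改善点があります。', 'high'),
--              ('改善の余地があります。', 'medium'),
--              ('継続して頑張りましょう。', 'low')]
--     def rank(r):
--         return RANK.get(r.get('priority'), 2)
--     best = min(recommendations, key=rank)
--     default, label = TABLE[rank(best)]
--     return best.get('message', default), label
-- ===== Notes on version B (the rewrite author's own statement) =====
-- stated objective: alternative
-- what changed: Replaced the filter-then-branch cascade by a rank-and-select algorithm: each recommendation is mapped to a numeric rank (high=0, medium=1, other=2), the stable minimum by rank is selected in one pass, and the default message and label come from a table indexed by that rank.
import Mathlib
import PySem

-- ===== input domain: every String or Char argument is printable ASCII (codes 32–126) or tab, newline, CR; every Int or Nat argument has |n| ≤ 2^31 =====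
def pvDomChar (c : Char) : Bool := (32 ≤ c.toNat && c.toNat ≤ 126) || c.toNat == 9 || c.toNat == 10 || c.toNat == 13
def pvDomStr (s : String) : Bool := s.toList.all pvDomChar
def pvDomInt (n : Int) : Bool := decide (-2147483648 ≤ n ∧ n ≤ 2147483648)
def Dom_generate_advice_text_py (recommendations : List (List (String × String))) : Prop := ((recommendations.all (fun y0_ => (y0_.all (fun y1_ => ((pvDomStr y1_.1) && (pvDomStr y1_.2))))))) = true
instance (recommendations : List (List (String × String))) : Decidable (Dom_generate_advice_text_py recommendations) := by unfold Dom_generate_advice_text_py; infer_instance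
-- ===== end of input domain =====

-- B replaces A's filter-then-branch cascade with rank-and-select: numeric rank (high=0, medium=1, other=2), stable minimum, table lookup (alternative decomposition, same cost).

-- ===== PORT A =====
def generate_advice_text_py (recommendations : List (List (String × String))) : String × String :=
  match recommendations with
  | [] => ("今日もお疲れ様でした。", "low")
  | r0 :: _ =>
    let high_priority := recommendations.filter
      (fun r => PySem.Dict.get? (PySem.Dict.mk r) "priority" == some "high")
    let medium_priority := recommendations.filter
      (fun r => PySem.Dict.get? (PySem.Dict.mk r) "priority" == some "medium")
    match high_priority with
    | h :: _ => (PySem.Dict.getD (PySem.Dict.mk h) "message" "重要な改善点があります。", "high")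
    | [] =>
      match medium_priority with
      | m :: _ => (PySem.Dict.getD (PySem.Dict.mk m) "message" "改善の余地があります。", "medium")
      | [] => (PySem.Dict.getD (PySem.Dict.mk r0) "message" "継続して頑張りましょう。", "low")

-- ===== PORT B =====
-- rank(r) = RANK.get(r.get('priority'), 2) with RANK = {'high': 0, 'medium': 1}
def pvRank (r : List (String × String)) : Nat :=
  PySem.Dict.getD (PySem.Dict.mk [("high", 0), ("medium", 1)])
    (PySem.Dict.getD (PySem.Dict.mk r) "priority" "") 2

-- Python's min(xs, key=rank): keep the first element of strictly smallest rank
def pvMinStep (best r : List (String × String)) : List (String × String) :=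
  if pvRank r < pvRank best then r else best

def pvAdviceTable : List (String × String) :=
  [("重要な改善点があります。", "high"),
   ("改善の余地があります。", "medium"),
   ("継続して頑張りましょう。", "low")]

def generate_advice_text_py_alt (recommendations : List (List (String × String))) : String × String :=
  match recommendations with
  | [] => ("今日もお疲れ様でした。", "low")
  | r0 :: rest =>
    let best := rest.foldl pvMinStep r0
    match pvAdviceTable[pvRank best]? with
    | some (dflt, label) => (PySem.Dict.getD (PySem.Dict.mk best) "message" dflt, label)
    | none => ("", "")  -- unreachable: pvRank < 3

-- ===== PRECONDITION & SPEC =====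
def Spec_generate_advice_text_py (recommendations : List (List (String × String))) (out : String × String) : Prop := out = generate_advice_text_py_alt recommendations
instance (recommendations : List (List (String × String))) (out : String × String) : Decidable (Spec_generate_advice_text_py recommendations out) := by unfold Spec_generate_advice_text_py; infer_instance

-- ===== CLAIM =====
def Claim_equal_generate_advice_text_py : Prop := ∀ (recommendations : List (List (String × String))), Dom_generate_advice_text_py recommendations → Spec_generate_advice_text_py recommendations (generate_advice_text_py recommendations)

-- ===== LEMMAS AND PROOFS =====

-- pvRank computed by cases on the priority value
theorem pvRank_cases (r : List (String × String)) :
    pvRank r = (if PySem.Dict.get? (PySem.Dict.mk r) "priority" == some "high" then 0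
                else if PySem.Dict.get? (PySem.Dict.mk r) "priority" == some "medium" then 1 else 2) := by
  unfold pvRank
  have hsplit : PySem.Dict.getD (PySem.Dict.mk r) "priority" ""
      = (PySem.Dict.get? (PySem.Dict.mk r) "priority").getD "" := rfl
  rw [hsplit]
  cases h : PySem.Dict.get? (PySem.Dict.mk r) "priority" with
  | none => decide
  | some v =>
    by_cases hv : v = "high"
    · subst hv; decide
    · by_cases hm : v = "medium"
      · subst hm; decide
      · have e1 : ("high" == v) = false := by
          simp only [beq_eq_false_iff_ne, ne_eq]
          exact fun e => hv e.symm
        have e2 : ("medium" == v) = false := by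
          simp only [beq_eq_false_iff_ne, ne_eq]
          exact fun e => hm e.symm
        simp [PySem.Dict.getD, PySem.Dict.get?, List.find?, e1, e2, hv, hm]

theorem pvRank_eq_zero (r : List (String × String)) :
    (pvRank r = 0) ↔ (PySem.Dict.get? (PySem.Dict.mk r) "priority" == some "high") = true := by
  rw [pvRank_cases]; split_ifs with h1 h2 <;> simp_all

theorem pvRank_eq_one (r : List (String × String)) :
    (pvRank r = 1) ↔ (PySem.Dict.get? (PySem.Dict.mk r) "priority" == some "medium") = true := by
  rw [pvRank_cases]; split_ifs with h1 h2 <;> simp_all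

theorem pvRank_lt_3 (r : List (String × String)) : pvRank r < 3 := by
  rw [pvRank_cases]; split_ifs <;> omega

-- the stable-min fold is the first rank-0 element, else first rank-1, else the seed
theorem pvMinFold_spec (l : List (List (String × String))) (b : List (String × String)) :
    l.foldl pvMinStep b =
      (match (b :: l).filter (fun r => pvRank r == 0) with
       | h :: _ => h
       | [] =>
         match (b :: l).filter (fun r => pvRank r == 1) with
         | m :: _ => m
         | [] => b) := by
  induction l generalizing b with
  | nil => cases h0 : pvRank b == 0 <;> cases h1 : pvRank b == 1 <;> simp [List.filter, h0, h1]
  | cons x xs ih =>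
    rw [List.foldl_cons, ih]
    have hb3 := pvRank_lt_3 b
    have hx3 := pvRank_lt_3 x
    have hb' : pvRank b = 0 ∨ pvRank b = 1 ∨ pvRank b = 2 := by omega
    have hx' : pvRank x = 0 ∨ pvRank x = 1 ∨ pvRank x = 2 := by omega
    rcases hb' with hb | hb | hb <;> rcases hx' with hx | hx | hx <;>
      simp [pvMinStep, List.filter, hb, hx]

-- ===== VERDICT =====
theorem generate_advice_text_py_spec : Claim_equal_generate_advice_text_py := by
  intro recs _
  unfold Spec_generate_advice_text_py generate_advice_text_py generate_advice_text_py_alt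
  cases recs with
  | nil => rfl
  | cons r0 rest =>
    simp only [pvMinFold_spec]
    have hfilter0 : (r0 :: rest).filter (fun r => pvRank r == 0) =
        (r0 :: rest).filter (fun r => PySem.Dict.get? (PySem.Dict.mk r) "priority" == some "high") := by
      apply List.filter_congr
      intro r _
      by_cases h : pvRank r = 0
      · simp [h, (pvRank_eq_zero r).mp h]
      · cases hh : (PySem.Dict.get? (PySem.Dict.mk r) "priority" == some "high")
        · simp [h]
        · exact absurd ((pvRank_eq_zero r).mpr hh) h
    have hfilter1 : (r0 :: rest).filter (fun r => pvRank r == 1) =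
        (r0 :: rest).filter (fun r => PySem.Dict.get? (PySem.Dict.mk r) "priority" == some "medium") := by
      apply List.filter_congr
      intro r _
      by_cases h : pvRank r = 1
      · simp [h, (pvRank_eq_one r).mp h]
      · cases hh : (PySem.Dict.get? (PySem.Dict.mk r) "priority" == some "medium")
        · simp [h]
        · exact absurd ((pvRank_eq_one r).mpr hh) h
    rw [hfilter0, hfilter1]
    cases hH : (r0 :: rest).filter (fun r => PySem.Dict.get? (PySem.Dict.mk r) "priority" == some "high") with
    | cons h t =>
      have hmem : h ∈ (r0 :: rest).filter (fun r => PySem.Dict.get? (PySem.Dict.mk r) "priority" == some "high") := by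
        rw [hH]; exact List.mem_cons_self
      have hr : pvRank h = 0 := (pvRank_eq_zero h).mpr (List.mem_filter.mp hmem).2
      simp [hr, pvAdviceTable]
    | nil =>
      cases hM : (r0 :: rest).filter (fun r => PySem.Dict.get? (PySem.Dict.mk r) "priority" == some "medium") with
      | cons m t =>
        have hmem : m ∈ (r0 :: rest).filter (fun r => PySem.Dict.get? (PySem.Dict.mk r) "priority" == some "medium") := by
          rw [hM]; exact List.mem_cons_self
        have hr : pvRank m = 1 := (pvRank_eq_one m).mpr (List.mem_filter.mp hmem).2
        simp [hr, pvAdviceTable]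
      | nil =>
        have h0 : pvRank r0 = 2 := by
          have hnh : ¬ ((PySem.Dict.get? (PySem.Dict.mk r0) "priority" == some "high") = true) := by
            intro hc
            have : r0 ∈ (r0 :: rest).filter (fun r => PySem.Dict.get? (PySem.Dict.mk r) "priority" == some "high") :=
              List.mem_filter.mpr ⟨List.mem_cons_self, hc⟩
            rw [hH] at this; exact absurd this (List.not_mem_nil)
          have hnm : ¬ ((PySem.Dict.get? (PySem.Dict.mk r0) "priority" == some "medium") = true) := by
            intro hc
            have : r0 ∈ (r0 :: rest).filter (fun r => PySem.Dict.get? (PySem.Dict.mk r) "priority" == some "medium") :=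
              List.mem_filter.mpr ⟨List.mem_cons_self, hc⟩
            rw [hM] at this; exact absurd this (List.not_mem_nil)
          have := pvRank_lt_3 r0
          have h0' : pvRank r0 ≠ 0 := fun h => hnh ((pvRank_eq_zero r0).mp h)
          have h1' : pvRank r0 ≠ 1 := fun h => hnm ((pvRank_eq_one r0).mp h)
          omega
        simp [h0, pvAdviceTable]
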